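-- pv_equiv track=rewrite | github.com/KATO-Hiro/AtCoder | AtCoder_Virtual_Contest/macle_20220517/c/main.py | count_cells
-- ===== SOURCE A (Python) =====
-- def count_cells(grids, h: int, w: int):
--     dot = '.'
--     up = [[1 if grids[i][j] == dot else 0 for j in range(w)] for i in range(h)]
--     down = [[1 if grids[i][j] == dot else 0 for j in range(w)] for i in range(h)]
--     left = [[1 if grids[i][j] == dot else 0 for j in range(w)] for i in range(h)]
--     right = [[1 if grids[i][j] == dot else 0 for j in range(w)] for i in range(h)]
--
--     for i in range(h - 2, -1, -1):
--         for j in range(w):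
--             if (grids[i][j] == dot):
--                 up[i][j] = up[i + 1][j] + 1
--             elif (grids[i][j] == ""):
--                 up[i][j] = up[i + 1][j]
--
--     for i in range(1, h):
--         for j in range(w):
--             if (grids[i][j] == dot):
--                 down[i][j] = down[i - 1][j] + 1
--             elif (grids[i][j] == ""):
--                 down[i][j] = down[i - 1][j]
--
--     for i in range(h):
--         for j in range(w - 2, -1, -1):
--             if (grids[i][j] == dot):
--                 left[i][j] = left[i][j + 1] + 1
--             elif (grids[i][j] == ""):
--                 left[i][j] = left[i][j + 1]
--
--     for i in range(h):
--         for j in range(1, w):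
--             if (grids[i][j] == dot):
--                 right[i][j] = right[i][j - 1] + 1
--             elif (grids[i][j] == ""):
--                 right[i][j] = right[i][j - 1]
--
--     ans = 0
--
--     for i in range(h):
--         for j in range(w):
--             if grids[i][j] != "#":
--                 if up[i][j] > 0 or down[i][j] > 0 or left[i][j] > 0 or right[i][j] > 0:
--                     ans += 1
--
--     return ans
-- ===== SOURCE B (Python) =====
-- def count_cells(grids, h: int, w: int):
--     # All four of A's DP tables are > 0 at (i, j) exactly when grids[i][j] == '.',
--     # so the answer is just the number of '.' cells in the h x w window.
--     ans = 0
--     for i in range(h):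
--         for j in range(w):
--             if grids[i][j] == '.':
--                 ans += 1
--     return ans
-- ===== Notes on version B (the rewrite author's own statement) =====
-- stated objective: simpler
-- what changed: Dropped all four prefix DP tables and the five table-building/scanning passes: each table entry is positive exactly when the cell is '.', so B counts '.' cells directly in one double loop over the same index ranges.
import Mathlib
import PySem

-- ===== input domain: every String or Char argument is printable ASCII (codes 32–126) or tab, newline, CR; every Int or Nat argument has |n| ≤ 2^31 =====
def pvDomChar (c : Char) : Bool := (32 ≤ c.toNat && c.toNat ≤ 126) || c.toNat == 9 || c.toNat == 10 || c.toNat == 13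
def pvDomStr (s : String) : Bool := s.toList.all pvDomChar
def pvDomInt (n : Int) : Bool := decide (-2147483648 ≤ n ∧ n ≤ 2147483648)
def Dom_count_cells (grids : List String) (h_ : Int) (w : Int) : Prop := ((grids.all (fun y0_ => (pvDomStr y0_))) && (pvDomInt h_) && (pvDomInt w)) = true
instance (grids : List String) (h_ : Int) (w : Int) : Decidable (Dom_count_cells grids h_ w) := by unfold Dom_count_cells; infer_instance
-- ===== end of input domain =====

-- B drops A's four DP tables (each entry is positive iff the cell is '.') and counts '.' cells
-- in a single double loop over the same index ranges; return-value equivalence on Pre_ is proved.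

-- grids[i][j] (in range under Pre_; total via defaults, exact on in-range indices)
def pvCell (grids : List String) (i j : Int) : Char :=
  PySem.List.pyGetD (PySem.List.pyGetD grids i "").toList j ' '

-- t[i][j] for the Int tables (in range by construction; exact on in-range indices)
def pvGet2 (t : List (List Int)) (i j : Int) : Int :=
  PySem.List.pyGetD (PySem.List.pyGetD t i []) j 0

-- t[i][j] = v
def pvSet2 (t : List (List Int)) (i j : Int) (v : Int) : List (List Int) :=
  PySem.List.pySetD t i (PySem.List.pySetD (PySem.List.pyGetD t i []) j v)

-- ===== PORT A =====
-- [[1 if grids[i][j] == '.' else 0 for j in range(w)] for i in range(h)]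
def pvInit (grids : List String) (h_ w : Int) : List (List Int) :=
  (PySem.List.pyRange 0 h_ 1).map (fun i =>
    (PySem.List.pyRange 0 w 1).map (fun j =>
      if pvCell grids i j = '.' then (1 : Int) else 0))

-- the inner-loop bodies of A's four DP passes; A's `elif grids[i][j] == ""` branches compare a
-- length-1 string with "" — always False in Python, so they are unreachable and carry no branch.
def pvUpStep (grids : List String) (i : Int) (t : List (List Int)) (j : Int) : List (List Int) :=
  if pvCell grids i j = '.' then pvSet2 t i j (pvGet2 t (i + 1) j + 1) else t

def pvDownStep (grids : List String) (i : Int) (t : List (List Int)) (j : Int) : List (List Int) :=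
  if pvCell grids i j = '.' then pvSet2 t i j (pvGet2 t (i - 1) j + 1) else t

def pvLeftStep (grids : List String) (i : Int) (t : List (List Int)) (j : Int) : List (List Int) :=
  if pvCell grids i j = '.' then pvSet2 t i j (pvGet2 t i (j + 1) + 1) else t

def pvRightStep (grids : List String) (i : Int) (t : List (List Int)) (j : Int) : List (List Int) :=
  if pvCell grids i j = '.' then pvSet2 t i j (pvGet2 t i (j - 1) + 1) else t

-- the body of A's final counting loop
def pvAnsStep (grids : List String) (u d l r : List (List Int)) (i ans j : Int) : Int :=
  if pvCell grids i j ≠ '#' then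
    (if 0 < pvGet2 u i j ∨ 0 < pvGet2 d i j ∨ 0 < pvGet2 l i j ∨ 0 < pvGet2 r i j
     then ans + 1 else ans)
  else ans

def count_cells (grids : List String) (h_ : Int) (w : Int) : Int :=
  let up := (PySem.List.pyRange (h_ - 2) (-1) (-1)).foldl (fun t i =>
      (PySem.List.pyRange 0 w 1).foldl (pvUpStep grids i) t) (pvInit grids h_ w)
  let down := (PySem.List.pyRange 1 h_ 1).foldl (fun t i =>
      (PySem.List.pyRange 0 w 1).foldl (pvDownStep grids i) t) (pvInit grids h_ w)
  let left := (PySem.List.pyRange 0 h_ 1).foldl (fun t i =>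
      (PySem.List.pyRange (w - 2) (-1) (-1)).foldl (pvLeftStep grids i) t) (pvInit grids h_ w)
  let right := (PySem.List.pyRange 0 h_ 1).foldl (fun t i =>
      (PySem.List.pyRange 1 w 1).foldl (pvRightStep grids i) t) (pvInit grids h_ w)
  (PySem.List.pyRange 0 h_ 1).foldl (fun ans i =>
    (PySem.List.pyRange 0 w 1).foldl (pvAnsStep grids up down left right i) ans) 0

-- ===== PORT B =====
def count_cells_alt (grids : List String) (h_ : Int) (w : Int) : Int :=
  (PySem.List.pyRange 0 h_ 1).foldl (fun ans i =>
    (PySem.List.pyRange 0 w 1).foldl (fun ans j =>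
      if pvCell grids i j = '.' then ans + 1 else ans) ans) 0

-- ===== PRECONDITION & SPEC =====
-- Pre_ excludes exactly the inputs where Python A raises IndexError: w > 0 together with a missing
-- row among the first h, or a row shorter than w among them.
def Pre_count_cells (grids : List String) (h_ : Int) (w : Int) : Prop :=
  w ≤ 0 ∨ (h_ ≤ (grids.length : Int) ∧ ∀ s ∈ grids.take h_.toNat, w ≤ (s.toList.length : Int))
instance (grids : List String) (h_ : Int) (w : Int) : Decidable (Pre_count_cells grids h_ w) := by
  unfold Pre_count_cells; infer_instance
def pvWitness_count_cells : List String × Int × Int := (["..", "#."], 2, 2)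

def Spec_count_cells (grids : List String) (h_ : Int) (w : Int) (out : Int) : Prop := out = count_cells_alt grids h_ w
instance (grids : List String) (h_ : Int) (w : Int) (out : Int) : Decidable (Spec_count_cells grids h_ w out) := by unfold Spec_count_cells; infer_instance

-- ===== CLAIM (what is proved, stated in full; the proofs are below) =====
def Claim_equal_count_cells : Prop := ∀ (grids : List String) (h_ : Int) (w : Int), Dom_count_cells grids h_ w → Pre_count_cells grids h_ w → Spec_count_cells grids h_ w (count_cells grids h_ w)

-- ===== LEMMAS AND PROOFS =====

-- shape of a table: h_ rows of w entries
def pvShape (t : List (List Int)) (h_ w : Int) : Prop :=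
  t.length = h_.toNat ∧ ∀ r ∈ t, r.length = w.toNat

-- the invariant every pass preserves: well-shaped, entries nonneg, positive iff '.'
def pvInv (grids : List String) (h_ w : Int) (t : List (List Int)) : Prop :=
  pvShape t h_ w ∧ ∀ i j : Int, 0 ≤ i → i < h_ → 0 ≤ j → j < w →
    0 ≤ pvGet2 t i j ∧ (0 < pvGet2 t i j ↔ pvCell grids i j = '.')

lemma pvGet2_init (grids : List String) (h_ w i j : Int)
    (hi0 : 0 ≤ i) (hih : i < h_) (hj0 : 0 ≤ j) (hjw : j < w) :
    pvGet2 (pvInit grids h_ w) i j = if pvCell grids i j = '.' then 1 else 0 := by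
  unfold pvGet2 pvInit
  rw [PySem.List.pyGetD_map_pyRange_of_nonneg _ _ _ _ hi0 hih,
      PySem.List.pyGetD_map_pyRange_of_nonneg _ _ _ _ hj0 hjw]

lemma pvShape_init (grids : List String) (h_ w : Int) : pvShape (pvInit grids h_ w) h_ w := by
  constructor
  · simp [pvInit, PySem.List.length_pyRange_one]
  · intro r hr
    simp only [pvInit, List.mem_map] at hr
    obtain ⟨i, _, rfl⟩ := hr
    simp [PySem.List.length_pyRange_one]

lemma pvInv_init (grids : List String) (h_ w : Int) : pvInv grids h_ w (pvInit grids h_ w) := by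
  refine ⟨pvShape_init grids h_ w, fun i j hi0 hih hj0 hjw => ?_⟩
  rw [pvGet2_init grids h_ w i j hi0 hih hj0 hjw]
  split_ifs with hdot <;> simp [hdot]

lemma pvShape_set2 (t : List (List Int)) (h_ w i j v : Int) (hs : pvShape t h_ w)
    (hi0 : 0 ≤ i) (hih : i < h_) (hh0 : 0 < h_) :
    pvShape (pvSet2 t i j v) h_ w := by
  obtain ⟨hlen, hrow⟩ := hs
  have hilen : i < (t.length : Int) := by rw [hlen]; omega
  refine ⟨by rw [pvSet2, PySem.List.length_pySetD, hlen], fun r hr => ?_⟩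
  rw [pvSet2, PySem.List.pySetD_of_nonneg _ _ hi0] at hr
  rcases List.mem_or_eq_of_mem_set hr with h | rfl
  · exact hrow r h
  · rw [PySem.List.length_pySetD]
    exact hrow _ (PySem.List.pyGetD_mem t [] ⟨by omega, hilen⟩)

lemma pvGet2_set2 (t : List (List Int)) (h_ w i j v a b : Int) (hs : pvShape t h_ w)
    (hi0 : 0 ≤ i) (hih : i < h_) (hj0 : 0 ≤ j) (hjw : j < w)
    (ha0 : 0 ≤ a) (hah : a < h_) (hb0 : 0 ≤ b) (hbw : b < w) :
    pvGet2 (pvSet2 t i j v) a b = if a = i ∧ b = j then v else pvGet2 t a b := by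
  obtain ⟨hlen, hrow⟩ := hs
  have hilen : i < (t.length : Int) := by rw [hlen]; omega
  have halen : a < (t.length : Int) := by rw [hlen]; omega
  have hrowi : (PySem.List.pyGetD t i []).length = w.toNat :=
    hrow _ (PySem.List.pyGetD_mem t [] ⟨by omega, hilen⟩)
  have hset : pvSet2 t i j v = t.set i.toNat ((PySem.List.pyGetD t i []).set j.toNat v) := by
    rw [pvSet2, PySem.List.pySetD_of_nonneg _ _ hj0, PySem.List.pySetD_of_nonneg _ _ hi0]
  unfold pvGet2
  rw [hset, PySem.List.pyGetD_eq_getElem _ _ ha0 (by simp; omega), List.getElem_set]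
  by_cases hia : i.toNat = a.toNat
  · have hai : a = i := by omega
    subst hai
    rw [if_pos rfl]
    simp only [true_and]
    rw [PySem.List.pyGetD_eq_getElem _ _ hb0 (by simp [hrowi]; omega), List.getElem_set]
    by_cases hjb : b = j
    · simp [hjb]
    · rw [if_neg (by omega), if_neg hjb,
          PySem.List.pyGetD_eq_getElem _ _ hb0 (by simp [hrowi]; omega)]
  · rw [if_neg hia, if_neg (fun hh : a = i ∧ b = j => hia (by rw [hh.1]))]
    rw [PySem.List.pyGetD_eq_getElem _ _ ha0 halen]

-- one row of a DP pass preserves the invariant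
lemma pvInv_inner (grids : List String) (h_ w i : Int) (hi0 : 0 ≤ i) (hih : i < h_)
    (js : List Int) (n1 n2 : Int → Int → Int)
    (hjs : ∀ j ∈ js, 0 ≤ j ∧ j < w)
    (hnb : ∀ j ∈ js, 0 ≤ n1 i j ∧ n1 i j < h_ ∧ 0 ≤ n2 i j ∧ n2 i j < w)
    (t : List (List Int)) (ht : pvInv grids h_ w t) :
    pvInv grids h_ w (js.foldl (fun t j =>
      if pvCell grids i j = '.' then pvSet2 t i j (pvGet2 t (n1 i j) (n2 i j) + 1) else t) t) := by
  induction js generalizing t with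
  | nil => exact ht
  | cons j js ih =>
    simp only [List.foldl_cons]
    have hj := hjs j List.mem_cons_self
    have hn := hnb j List.mem_cons_self
    refine ih (fun x hx => hjs x (List.mem_cons_of_mem _ hx))
      (fun x hx => hnb x (List.mem_cons_of_mem _ hx)) _ ?_
    by_cases hdot : pvCell grids i j = '.'
    · rw [if_pos hdot]
      obtain ⟨hsh, hval⟩ := ht
      refine ⟨pvShape_set2 t h_ w i j _ hsh hi0 hih (by omega), ?_⟩
      intro a b ha0 hah hb0 hbw
      rw [pvGet2_set2 t h_ w i j _ a b hsh hi0 hih hj.1 hj.2 ha0 hah hb0 hbw]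
      by_cases hab : a = i ∧ b = j
      · have hnn := (hval (n1 i j) (n2 i j) hn.1 hn.2.1 hn.2.2.1 hn.2.2.2).1
        rw [if_pos hab]
        refine ⟨by omega, ?_⟩
        rw [hab.1, hab.2]
        exact ⟨fun _ => hdot, fun _ => by omega⟩
      · rw [if_neg hab]
        exact hval a b ha0 hah hb0 hbw
    · rw [if_neg hdot]
      exact ht

-- one DP pass (any of the four) preserves the invariant
lemma pvInv_pass (grids : List String) (h_ w : Int) (is js : List Int)
    (n1 n2 : Int → Int → Int)
    (his : ∀ i ∈ is, 0 ≤ i ∧ i < h_) (hjs : ∀ j ∈ js, 0 ≤ j ∧ j < w)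
    (hnb : ∀ i ∈ is, ∀ j ∈ js, 0 ≤ n1 i j ∧ n1 i j < h_ ∧ 0 ≤ n2 i j ∧ n2 i j < w)
    (t : List (List Int)) (ht : pvInv grids h_ w t) :
    pvInv grids h_ w (is.foldl (fun t i =>
      js.foldl (fun t j =>
        if pvCell grids i j = '.' then pvSet2 t i j (pvGet2 t (n1 i j) (n2 i j) + 1) else t) t) t) := by
  induction is generalizing t with
  | nil => exact ht
  | cons i is ih =>
    simp only [List.foldl_cons]
    have hi := his i List.mem_cons_self
    exact ih (fun x hx => his x (List.mem_cons_of_mem _ hx))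
      (fun x hx j hj => hnb x (List.mem_cons_of_mem _ hx) j hj) _
      (pvInv_inner grids h_ w i hi.1 hi.2 js n1 n2 hjs
        (fun j hj => hnb i List.mem_cons_self j hj) t ht)

-- the counting loop of A equals B's loop once all four tables satisfy the invariant
lemma pvCount_eq (grids : List String) (h_ w : Int) (u d l r : List (List Int))
    (hu : pvInv grids h_ w u) (hd : pvInv grids h_ w d)
    (hl : pvInv grids h_ w l) (hr : pvInv grids h_ w r) :
    (PySem.List.pyRange 0 h_ 1).foldl (fun ans i =>
      (PySem.List.pyRange 0 w 1).foldl (pvAnsStep grids u d l r i) ans) 0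
    = count_cells_alt grids h_ w := by
  unfold count_cells_alt
  refine PySem.List.foldl_congr_mem _ _ _ _ (fun ans i hi => ?_)
  refine PySem.List.foldl_congr_mem _ _ _ _ (fun a j hj => ?_)
  rw [PySem.List.mem_pyRange_one] at hi hj
  obtain ⟨_, h1⟩ := hu.2 i j hi.1 hi.2 hj.1 hj.2
  obtain ⟨_, h2⟩ := hd.2 i j hi.1 hi.2 hj.1 hj.2
  obtain ⟨_, h3⟩ := hl.2 i j hi.1 hi.2 hj.1 hj.2
  obtain ⟨_, h4⟩ := hr.2 i j hi.1 hi.2 hj.1 hj.2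
  unfold pvAnsStep
  by_cases hdot : pvCell grids i j = '.'
  · have hns : pvCell grids i j ≠ '#' := by rw [hdot]; decide
    have p1 := h1.mpr hdot
    simp [hdot, p1]
  · have n1 : ¬ 0 < pvGet2 u i j := fun hp => hdot (h1.mp hp)
    have n2 : ¬ 0 < pvGet2 d i j := fun hp => hdot (h2.mp hp)
    have n3 : ¬ 0 < pvGet2 l i j := fun hp => hdot (h3.mp hp)
    have n4 : ¬ 0 < pvGet2 r i j := fun hp => hdot (h4.mp hp)
    simp [hdot]
    intro _
    omega

-- ===== VERDICT (by name: the statement is the Claim_ definition above) =====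
theorem count_cells_spec : Claim_equal_count_cells := by
  intro grids h_ w _hdom _hpre
  unfold Spec_count_cells count_cells pvUpStep pvDownStep pvLeftStep pvRightStep
  apply pvCount_eq
  all_goals
    apply pvInv_pass _ _ _ _ _ _ _
      (fun i hi => ?_) (fun j hj => ?_) (fun i hi j hj => ?_) _ (pvInv_init grids h_ w)
  all_goals
    first
    | (simp only [PySem.List.mem_pyRange_one] at hi hj ⊢ <;> omega)
    | (simp only [PySem.List.mem_pyRange_neg_one] at hi hj ⊢ <;> omega)
    | (simp only [PySem.List.mem_pyRange_one, PySem.List.mem_pyRange_neg_one] at * <;> omega)
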